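-- pv_equiv track=rewrite | github.com/HVoTM/Projects | Leetcode/easy/gcd_strings.py | gcdOfStrings
-- ===== SOURCE A (Python) =====
-- def gcdOfStrings(str1: str, str2: str) -> str:
--     # check which string is larger
--     if min(len(str1), len(str2)) == len(str1):
--         smaller = str1; larger = str2
--     else:
--         smaller = str2; larger = str1
--
--     gcd = ""
--     for j in range(len(smaller)):
--         temp = smaller[0:j+1]
--         mod_1 = len(larger) % len(temp)
--         mux_1 = int(len(larger) / len(temp))
--         mod_2 = len(smaller) % len(temp)
--         mux_2 = int(len(smaller) / len(temp))
--
--         if (mod_1 == 0) & (larger == temp * mux_1) & (mod_2 == 0) & (smaller == temp * mux_2):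
--             gcd = temp
--
--     return gcd
-- ===== SOURCE B (Python) =====
-- def gcdOfStrings(str1: str, str2: str) -> str:
--     # Two strings have a common divisor iff their concatenations commute;
--     # then the divisor of maximal length has length gcd(len1, len2).
--     if str1 + str2 != str2 + str1:
--         return ""
--     a, b = len(str1), len(str2)
--     while b:
--         a, b = b, a % b
--     return str1[:a]
-- ===== Notes on version B (the rewrite author's own statement) =====
-- stated objective: faster
-- what changed: Replaces A's loop that tests every prefix of the smaller string as a candidate divisor (each test rebuilding and comparing whole strings) with the classic O(n) check str1+str2 == str2+str1 followed by taking the prefix of length gcd(len1, len2) computed by Euclid's algorithm.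
-- intended difference: When str2 is empty and str1 is not, A makes the empty string the 'smaller' loop string and returns '', while B returns str1, which is the intended answer since str1 divides both str1 and the empty string. — e.g. on gcdOfStrings("AB", ""): A returns "", B returns "AB"
import Mathlib
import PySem

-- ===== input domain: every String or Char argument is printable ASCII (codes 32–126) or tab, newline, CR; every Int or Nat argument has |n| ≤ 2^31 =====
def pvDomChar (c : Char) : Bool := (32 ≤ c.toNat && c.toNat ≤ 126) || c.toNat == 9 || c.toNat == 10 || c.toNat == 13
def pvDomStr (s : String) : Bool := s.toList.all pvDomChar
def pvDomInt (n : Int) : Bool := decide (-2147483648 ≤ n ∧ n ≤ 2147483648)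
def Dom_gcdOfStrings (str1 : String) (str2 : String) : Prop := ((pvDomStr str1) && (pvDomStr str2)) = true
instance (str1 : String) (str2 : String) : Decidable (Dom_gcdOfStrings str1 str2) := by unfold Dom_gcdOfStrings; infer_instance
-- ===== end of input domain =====

-- B replaces A's quadratic try-every-prefix loop by the linear check
-- str1+str2 == str2+str1 followed by the prefix of length gcd(len1,len2).

-- ===== PORT A =====
-- literal transliteration of A; string ops are done on the List Char side
-- (int(len/len) is ported as floor division: exact for these nonnegative operands)
def gcdOfStrings (str1 : String) (str2 : String) : String :=
  let s1 := str1.toList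
  let s2 := str2.toList
  let smaller := if min s1.length s2.length = s1.length then s1 else s2
  let larger  := if min s1.length s2.length = s1.length then s2 else s1
  let gcd := (PySem.List.pyRange 0 (smaller.length : Int) 1).foldl (fun gcd j =>
    let temp := PySem.List.slice smaller (some 0) (some (j + 1))
    let mod_1 := PySem.Int.mod (larger.length : Int) (temp.length : Int)
    let mux_1 := PySem.Int.floordiv (larger.length : Int) (temp.length : Int)
    let mod_2 := PySem.Int.mod (smaller.length : Int) (temp.length : Int)
    let mux_2 := PySem.Int.floordiv (smaller.length : Int) (temp.length : Int)
    if mod_1 = 0 ∧ larger = PySem.List.pyRepeat temp mux_1 ∧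
       mod_2 = 0 ∧ smaller = PySem.List.pyRepeat temp mux_2 then temp else gcd) []
  String.ofList gcd

-- ===== PORT B =====
-- the hand-written Euclid while-loop of Source B
def euclidLoop : Nat → Nat → Nat
  | a, 0 => a
  | a, b + 1 => euclidLoop (b + 1) (a % (b + 1))
decreasing_by exact Nat.mod_lt _ (Nat.succ_pos b)

def gcdOfStrings_alt (str1 : String) (str2 : String) : String :=
  let s1 := str1.toList
  let s2 := str2.toList
  if s1 ++ s2 ≠ s2 ++ s1 then ""
  else String.ofList (s1.take (euclidLoop s1.length s2.length))

-- ===== PRECONDITION & SPEC =====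
-- When str2 is empty and str1 is not, A loops over the empty 'smaller' string and
-- returns "", while B returns str1, the intended answer: str1 divides both str1 and "".
def D_gcdOfStrings (str1 : String) (str2 : String) : Prop :=
  str2.toList = [] ∧ str1.toList ≠ []
instance (str1 : String) (str2 : String) : Decidable (D_gcdOfStrings str1 str2) := by
  unfold D_gcdOfStrings; infer_instance

def Spec_gcdOfStrings (str1 : String) (str2 : String) (out : String) : Prop :=
  ¬ D_gcdOfStrings str1 str2 → out = gcdOfStrings_alt str1 str2
instance (str1 : String) (str2 : String) (out : String) : Decidable (Spec_gcdOfStrings str1 str2 out) := by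
  unfold Spec_gcdOfStrings; infer_instance

def pvDiffWitness_gcdOfStrings : String × String := ("AB", "")
def pvDiffWitnessOut_gcdOfStrings : String × String := ("", "AB")

-- ===== CLAIM (what is proved, stated in full; the proofs are below) =====
def Claim_unchanged_gcdOfStrings : Prop := ∀ (str1 : String) (str2 : String), Dom_gcdOfStrings str1 str2 → Spec_gcdOfStrings str1 str2 (gcdOfStrings str1 str2)
def Claim_changed_gcdOfStrings : Prop := Dom_gcdOfStrings (pvDiffWitness_gcdOfStrings.1) (pvDiffWitness_gcdOfStrings.2) ∧ D_gcdOfStrings (pvDiffWitness_gcdOfStrings.1) (pvDiffWitness_gcdOfStrings.2) ∧ gcdOfStrings (pvDiffWitness_gcdOfStrings.1) (pvDiffWitness_gcdOfStrings.2) = pvDiffWitnessOut_gcdOfStrings.1 ∧ gcdOfStrings_alt (pvDiffWitness_gcdOfStrings.1) (pvDiffWitness_gcdOfStrings.2) = pvDiffWitnessOut_gcdOfStrings.2 ∧ pvDiffWitnessOut_gcdOfStrings.1 ≠ pvDiffWitnessOut_gcdOfStrings.2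
def Claim_exact_gcdOfStrings : Prop := ∀ (str1 : String) (str2 : String), Dom_gcdOfStrings str1 str2 → D_gcdOfStrings str1 str2 → gcdOfStrings str1 str2 ≠ gcdOfStrings_alt str1 str2

-- ===== LEMMAS AND PROOFS =====

-- repeated word
def repL (k : Nat) (t : List Char) : List Char := (List.replicate k t).flatten

-- the loop condition of A at prefix length k+1, in Nat form (abbrev so that
-- the Decidable instance of the ite in Astep is found by unfolding)
abbrev CondA (sm lg : List Char) (k : Nat) : Prop :=
  (k + 1) ∣ lg.length ∧ lg = repL (lg.length / (k + 1)) (sm.take (k + 1)) ∧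
  (k + 1) ∣ sm.length ∧ sm = repL (sm.length / (k + 1)) (sm.take (k + 1))

def Astep (sm lg : List Char) (acc : List Char) (k : Nat) : List Char :=
  if CondA sm lg k then sm.take (k + 1) else acc

lemma euclidLoop_eq_gcd (a b : Nat) : euclidLoop a b = Nat.gcd a b := by
  induction a, b using euclidLoop.induct with
  | case1 a => simp [euclidLoop]
  | case2 a b ih =>
      rw [euclidLoop, ih, Nat.gcd_comm (b + 1) (a % (b + 1)), ← Nat.gcd_rec, Nat.gcd_comm]

lemma repL_append (a b : Nat) (t : List Char) : repL a t ++ repL b t = repL (a + b) t := by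
  unfold repL
  rw [← List.flatten_append, ← List.replicate_add]

lemma rep_comm (s l : List Char) (a b : Nat) (t : List Char)
    (hs : s = repL a t) (hl : l = repL b t) : s ++ l = l ++ s := by
  subst hs hl; rw [repL_append, repL_append, Nat.add_comm]

-- the string gcd decomposition: commuting nonempty words are powers of the
-- prefix of length gcd of the lengths
lemma comm_decomp : ∀ (N : Nat) (s l : List Char), s.length + l.length ≤ N →
    s ≠ [] → l ≠ [] → s ++ l = l ++ s →
    s = repL (s.length / Nat.gcd s.length l.length) (s.take (Nat.gcd s.length l.length)) ∧
    l = repL (l.length / Nat.gcd s.length l.length) (s.take (Nat.gcd s.length l.length)) := by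
  intro N
  induction N with
  | zero =>
      intro s l hN hs _ _
      have : 0 < s.length := List.length_pos_of_ne_nil hs
      omega
  | succ N ih =>
      intro s l hN hs hl h
      have hs0 : 0 < s.length := List.length_pos_of_ne_nil hs
      have hl0 : 0 < l.length := List.length_pos_of_ne_nil hl
      rcases Nat.lt_trichotomy s.length l.length with hlt | heq | hgt
      · -- s is a proper prefix of l
        have hpre : l.take s.length = s := by
          have h1 := congrArg (List.take s.length) h
          rw [List.take_left, List.take_append_of_le_length (le_of_lt hlt)] at h1
          exact h1.symm
        set l' := l.drop s.length with hl'def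
        have hsplit : l = s ++ l' := by
          conv_lhs => rw [← List.take_append_drop s.length l]
          rw [hpre]
        have hlen' : l'.length = l.length - s.length := by
          simp [hl'def]
        have hcomm' : s ++ l' = l' ++ s := by
          have h2 : s ++ (s ++ l') = (s ++ l') ++ s := by rw [← hsplit]; exact h
          rw [List.append_assoc] at h2
          exact (List.append_cancel_left h2)
        have hl'ne : l' ≠ [] := by
          intro hx
          rw [hx] at hlen'
          simp at hlen'
          omega
        have hN' : s.length + l'.length ≤ N := by omega
        obtain ⟨ihs, ihl⟩ := ih s l' hN' hs hl'ne hcomm'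
        have hg : Nat.gcd s.length l'.length = Nat.gcd s.length l.length := by
          rw [hlen', Nat.gcd_sub_self_right (le_of_lt hlt)]
        rw [hg] at ihs ihl
        set g := Nat.gcd s.length l.length with hgdef
        have hgs : g ∣ s.length := Nat.gcd_dvd_left _ _
        have hgl : g ∣ l.length := Nat.gcd_dvd_right _ _
        have hg0 : 0 < g := Nat.gcd_pos_of_pos_left _ hs0
        refine ⟨ihs, ?_⟩
        have hdivadd : s.length / g + l'.length / g = l.length / g := by
          obtain ⟨a, ha⟩ := hgs
          obtain ⟨b, hb⟩ := hgl
          have hab : a ≤ b := by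
            have : g * a ≤ g * b := by omega
            exact Nat.le_of_mul_le_mul_left this hg0
          have hl'' : l'.length = g * (b - a) := by
            rw [hlen', ha, hb, Nat.mul_sub]
          rw [ha, hb, hl'', Nat.mul_div_cancel_left _ hg0,
            Nat.mul_div_cancel_left _ hg0, Nat.mul_div_cancel_left _ hg0]
          omega
        rw [hsplit]
        conv_lhs => rw [ihs, ihl]
        rw [repL_append, hdivadd]
        have hlen2 : (s ++ l').length = l.length := by
          rw [List.length_append]; omega
        rw [hlen2]
      · -- equal lengths: s = l
        have hsl : s = l := by
          have h1 := congrArg (List.take s.length) h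
          rw [List.take_left, heq, List.take_left] at h1
          exact h1
        subst hsl
        rw [Nat.gcd_self, Nat.div_self hs0, List.take_length]
        constructor <;> simp [repL]
      · -- l is a proper prefix of s
        have hpre : s.take l.length = l := by
          have h1 := congrArg (List.take l.length) h.symm
          rw [List.take_left, List.take_append_of_le_length (le_of_lt hgt)] at h1
          exact h1.symm
        set s' := s.drop l.length with hs'def
        have hsplit : s = l ++ s' := by
          conv_lhs => rw [← List.take_append_drop l.length s]
          rw [hpre]
        have hlen' : s'.length = s.length - l.length := by
          simp [hs'def]
        have hcomm' : l ++ s' = s' ++ l := by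
          have h2 : l ++ (l ++ s') = (l ++ s') ++ l := by rw [← hsplit]; exact h.symm
          rw [List.append_assoc] at h2
          exact (List.append_cancel_left h2)
        have hs'ne : s' ≠ [] := by
          intro hx
          rw [hx] at hlen'
          simp at hlen'
          omega
        have hN' : l.length + s'.length ≤ N := by omega
        obtain ⟨ihl, ihs⟩ := ih l s' hN' hl hs'ne hcomm'
        have hg : Nat.gcd l.length s'.length = Nat.gcd s.length l.length := by
          rw [hlen', Nat.gcd_sub_self_right (le_of_lt hgt), Nat.gcd_comm]
        rw [hg] at ihl ihs
        set g := Nat.gcd s.length l.length with hgdef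
        have hgs : g ∣ s.length := Nat.gcd_dvd_left _ _
        have hgl : g ∣ l.length := Nat.gcd_dvd_right _ _
        have hg0 : 0 < g := Nat.gcd_pos_of_pos_left _ hs0
        have hglel : g ≤ l.length := Nat.le_of_dvd hl0 hgl
        have htake : s.take g = l.take g := by
          rw [hsplit, List.take_append_of_le_length hglel]
        rw [htake]
        have hdivadd : l.length / g + s'.length / g = s.length / g := by
          obtain ⟨a, ha⟩ := hgs
          obtain ⟨b, hb⟩ := hgl
          have hab : b ≤ a := by
            have : g * b ≤ g * a := by omega
            exact Nat.le_of_mul_le_mul_left this hg0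
          have hs'' : s'.length = g * (a - b) := by
            rw [hlen', ha, hb, Nat.mul_sub]
          rw [ha, hb, hs'', Nat.mul_div_cancel_left _ hg0,
            Nat.mul_div_cancel_left _ hg0, Nat.mul_div_cancel_left _ hg0]
          omega
        constructor
        · rw [hsplit]
          conv_lhs => rw [ihl, ihs]
          rw [repL_append, hdivadd]
          have hlen2 : (l ++ s').length = s.length := by
            rw [List.length_append]; omega
          rw [hlen2]
        · exact ihl

-- foldl over indices where the condition never holds is the identity
lemma foldl_Astep_none (sm lg : List Char) :
    ∀ (ks : List Nat) (acc : List Char), (∀ k ∈ ks, ¬ CondA sm lg k) →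
    ks.foldl (Astep sm lg) acc = acc := by
  intro ks
  induction ks with
  | nil => intro acc _; rfl
  | cons k ks ih =>
      intro acc h
      simp only [List.foldl_cons, Astep, if_neg (h k (by simp))]
      exact ih acc (fun x hx => h x (by simp [hx]))

-- A's loop written over List.range with the Nat-form step
lemma A_loop_eq (sm lg : List Char) :
    (PySem.List.pyRange 0 (sm.length : Int) 1).foldl (fun gcd j =>
      let temp := PySem.List.slice sm (some 0) (some (j + 1))
      let mod_1 := PySem.Int.mod (lg.length : Int) (temp.length : Int)
      let mux_1 := PySem.Int.floordiv (lg.length : Int) (temp.length : Int)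
      let mod_2 := PySem.Int.mod (sm.length : Int) (temp.length : Int)
      let mux_2 := PySem.Int.floordiv (sm.length : Int) (temp.length : Int)
      if mod_1 = 0 ∧ lg = PySem.List.pyRepeat temp mux_1 ∧
         mod_2 = 0 ∧ sm = PySem.List.pyRepeat temp mux_2 then temp else gcd) []
    = (List.range sm.length).foldl (Astep sm lg) [] := by
  rw [PySem.List.pyRange_one]
  have hn : (((sm.length : Int)) - 0).toNat = sm.length := by omega
  rw [hn, List.foldl_map]
  apply List.foldl_ext
  intro acc k hk
  have hk1 : k + 1 ≤ sm.length := List.mem_range.mp hk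
  have hcast : (0 : Int) + (k : Int) + 1 = ((k + 1 : Nat) : Int) := by push_cast; ring
  have htemp : PySem.List.slice sm (some 0) (some (((k + 1 : Nat) : Int))) = sm.take (k + 1) := by
    rw [PySem.List.slice_zero_start, PySem.List.slice_to_natCast]
  have hlen : (sm.take (k + 1)).length = k + 1 := by
    rw [List.length_take]; omega
  have hfd : ∀ M : Nat, PySem.Int.floordiv (M : Int) ((k + 1 : Nat) : Int)
      = ((M / (k + 1) : Nat) : Int) := by
    intro M
    show (Int.ofNat M).fdiv (Int.ofNat (k + 1)) = Int.ofNat (M / (k + 1))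
    cases M with
    | zero => simp [Int.fdiv]
    | succ m => rfl
  have hrep : ∀ M : Nat, PySem.List.pyRepeat (sm.take (k + 1)) ((M : Int))
      = repL M (sm.take (k + 1)) := by
    intro M
    simp [PySem.List.pyRepeat, repL]
  simp only [hcast, htemp, hlen, hfd, hrep, Astep, CondA,
    PySem.Int.mod_eq_zero_iff_dvd, Int.natCast_dvd_natCast]

-- in the commuting nonempty case A's loop returns the prefix of length gcd
lemma A_loop_comm (sm lg : List Char) (hs : sm ≠ []) (hl : lg ≠ [])
    (_hle : sm.length ≤ lg.length) (h : sm ++ lg = lg ++ sm) :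
    (List.range sm.length).foldl (Astep sm lg) [] =
      sm.take (Nat.gcd sm.length lg.length) := by
  have hs0 : 0 < sm.length := List.length_pos_of_ne_nil hs
  set g := Nat.gcd sm.length lg.length with hgdef
  have hg0 : 0 < g := Nat.gcd_pos_of_pos_left _ hs0
  have hgs : g ∣ sm.length := Nat.gcd_dvd_left _ _
  have hgl : g ∣ lg.length := Nat.gcd_dvd_right _ _
  have hgle : g ≤ sm.length := Nat.le_of_dvd hs0 hgs
  obtain ⟨hdS, hdL⟩ := comm_decomp (sm.length + lg.length) sm lg le_rfl hs hl h
  have hrange : List.range sm.length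
      = (List.range (g - 1) ++ [g - 1]) ++ (List.range (sm.length - g)).map (fun j => g + j) := by
    have h1 : sm.length = g + (sm.length - g) := by omega
    conv_lhs => rw [h1]
    rw [List.range_add]
    congr 1
    have h2 : g = (g - 1) + 1 := by omega
    conv_lhs => rw [h2]
    rw [List.range_succ]
  have hg1 : g - 1 + 1 = g := by omega
  have hcond : CondA sm lg (g - 1) := by
    unfold CondA
    rw [hg1]
    exact ⟨hgl, hdL, hgs, hdS⟩
  rw [hrange, List.foldl_append, List.foldl_append]
  simp only [List.foldl_cons, List.foldl_nil, Astep, if_pos hcond, hg1]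
  apply foldl_Astep_none
  intro k hk hc
  simp only [List.mem_map, List.mem_range] at hk
  obtain ⟨j, hj, rfl⟩ := hk
  have hdvd : (g + j + 1) ∣ g := Nat.dvd_gcd hc.2.2.1 hc.1
  have := Nat.le_of_dvd hg0 hdvd
  omega

-- in the non-commuting case the loop never fires
lemma A_loop_nocomm (sm lg : List Char) (h : sm ++ lg ≠ lg ++ sm) :
    (List.range sm.length).foldl (Astep sm lg) [] = [] := by
  apply foldl_Astep_none
  intro k _ hc
  exact h (rep_comm sm lg _ _ _ hc.2.2.2 hc.2.1)

lemma take_gcd_eq (s1 s2 : List Char) (h : s1 ++ s2 = s2 ++ s1) (g : Nat)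
    (h1 : g ≤ s1.length) (h2 : g ≤ s2.length) : s1.take g = s2.take g := by
  have e1 : (s1 ++ s2).take g = s1.take g := List.take_append_of_le_length h1
  have e2 : (s2 ++ s1).take g = s2.take g := List.take_append_of_le_length h2
  rw [← e1, ← e2, h]

lemma main_loop (s1 s2 : List Char) (hnd : ¬(s2 = [] ∧ s1 ≠ [])) :
    String.ofList ((List.range (if min s1.length s2.length = s1.length then s1 else s2).length).foldl
      (Astep (if min s1.length s2.length = s1.length then s1 else s2)
             (if min s1.length s2.length = s1.length then s2 else s1)) [])
    = (if s1 ++ s2 ≠ s2 ++ s1 then ""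
       else String.ofList (s1.take (Nat.gcd s1.length s2.length))) := by
  by_cases hs1 : s1 = []
  · subst hs1
    have hmin : min ([] : List Char).length s2.length = ([] : List Char).length := by simp
    rw [if_pos hmin, if_pos hmin,
      if_neg (show ¬(([] : List Char) ++ s2 ≠ s2 ++ ([] : List Char)) from by simp)]
    simp
  · have hs2 : s2 ≠ [] := fun hx => hnd ⟨hx, hs1⟩
    have hp1 : 0 < s1.length := List.length_pos_of_ne_nil hs1
    have hp2 : 0 < s2.length := List.length_pos_of_ne_nil hs2
    by_cases hcomm : s1 ++ s2 = s2 ++ s1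
    · rw [if_neg (show ¬(s1 ++ s2 ≠ s2 ++ s1) from not_not_intro hcomm)]
      by_cases hmin : min s1.length s2.length = s1.length
      · rw [if_pos hmin, if_pos hmin]
        have hle : s1.length ≤ s2.length := by omega
        rw [A_loop_comm s1 s2 hs1 hs2 hle hcomm]
      · rw [if_neg hmin, if_neg hmin]
        have hle : s2.length ≤ s1.length := by omega
        rw [A_loop_comm s2 s1 hs2 hs1 hle hcomm.symm]
        have hg : Nat.gcd s2.length s1.length = Nat.gcd s1.length s2.length :=
          Nat.gcd_comm _ _
        rw [hg]
        congr 1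
        exact (take_gcd_eq s1 s2 hcomm _
          (Nat.le_of_dvd hp1 (Nat.gcd_dvd_left _ _))
          (Nat.le_of_dvd hp2 (Nat.gcd_dvd_right _ _))).symm
    · rw [if_pos (show (s1 ++ s2 ≠ s2 ++ s1) from hcomm)]
      by_cases hmin : min s1.length s2.length = s1.length
      · rw [if_pos hmin, if_pos hmin, A_loop_nocomm s1 s2 hcomm]
      · rw [if_neg hmin, if_neg hmin,
          A_loop_nocomm s2 s1 (fun hx => hcomm hx.symm)]

-- ===== VERDICT (by name: the statement is the Claim_ definition above) =====
theorem gcdOfStrings_spec : Claim_unchanged_gcdOfStrings := by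
  intro str1 str2 _
  unfold Spec_gcdOfStrings
  intro hD
  unfold D_gcdOfStrings at hD
  unfold gcdOfStrings gcdOfStrings_alt
  simp only [A_loop_eq, euclidLoop_eq_gcd]
  exact main_loop str1.toList str2.toList hD

theorem gcdOfStrings_changed : Claim_changed_gcdOfStrings := by
  unfold Claim_changed_gcdOfStrings
  refine ⟨by decide, by decide, by rfl, ?_, by decide⟩
  show gcdOfStrings_alt "AB" "" = "AB"
  simp only [gcdOfStrings_alt, euclidLoop_eq_gcd]
  rfl

theorem gcdOfStrings_tight : Claim_exact_gcdOfStrings := by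
  unfold Claim_exact_gcdOfStrings
  intro str1 str2 _ hD heq
  obtain ⟨h2, h1⟩ := hD
  have hpos : 0 < str1.toList.length := List.length_pos_of_ne_nil h1
  have hA : gcdOfStrings str1 str2 = String.ofList [] := by
    unfold gcdOfStrings
    simp only [A_loop_eq, h2, List.length_nil, Nat.min_zero]
    rw [if_neg (by omega), if_neg (by omega)]
    rfl
  have hB : gcdOfStrings_alt str1 str2 = String.ofList str1.toList := by
    unfold gcdOfStrings_alt
    simp only [h2]
    rw [if_neg (show ¬(str1.toList ++ [] ≠ [] ++ str1.toList) from by simp),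
      euclidLoop_eq_gcd, List.length_nil, Nat.gcd_zero_right, List.take_length]
  rw [hA, hB] at heq
  exact h1 (String.ofList_inj.mp heq).symm
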